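-- pv_equiv track=rewrite | github.com/traceopt-ai/traceml | src/traceml/renderers/step_combined/compute.py | _common_window_steps_fast
-- ===== SOURCE A (Python) =====
-- from typing import Dict, List, Optional, Sequence, Tuple
--
-- def _common_window_steps_fast(
--     per_rank_steps: Dict[int, Dict[int, float]],
--     completed_step: int,
--     window_size: int,
-- ) -> List[int]:
--     """
--     Faster version of:
--       intersect step indices across ranks (<= completed_step),
--       return last window_size common steps, ascending.
--
--     Walk backward from completed_step and test membership in all rank maps.
--     Equivalent output to intersection+sorted+slice for the "suffix of common steps".
--     """
--     if not per_rank_steps: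
--         return []
--
--     maps = list(per_rank_steps.values())
--     ref = maps[0]
--
--     out_rev: List[int] = []
--     s = completed_step
--     while s >= 0 and len(out_rev) < window_size:
--         if s in ref:
--             ok = True
--             for m in maps[1:]:
--                 if s not in m:
--                     ok = False
--                     break
--             if ok:
--                 out_rev.append(s)
--         s -= 1
--
--     if not out_rev:
--         return []
--     out_rev.reverse()
--     return out_rev
-- ===== SOURCE B (Python) =====
-- from typing import Dict, List
--
--
-- def _common_window_steps_fast(
--     per_rank_steps: Dict[int, Dict[int, float]],
--     completed_step: int,
--     window_size: int,
-- ) -> List[int]: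
--     """Intersect the rank key sets once, keep steps in [0, completed_step],
--     sort ascending and return the last window_size of them."""
--     if not per_rank_steps:
--         return []
--     maps = list(per_rank_steps.values())
--     common = set(maps[0])
--     for m in maps[1:]:
--         common = {k for k in common if k in m}
--     eligible = sorted(k for k in common if 0 <= k <= completed_step)
--     return eligible[max(len(eligible) - max(window_size, 0), 0):]
-- ===== Notes on version B (the rewrite author's own statement) =====
-- stated objective: alternative
-- what changed: Replaces the backward step-by-step walk from completed_step (membership-testing every integer until the window fills) with a one-shot intersection of the rank key sets, a filter to [0, completed_step], a sort, and a tail slice of window_size.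
import Mathlib
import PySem

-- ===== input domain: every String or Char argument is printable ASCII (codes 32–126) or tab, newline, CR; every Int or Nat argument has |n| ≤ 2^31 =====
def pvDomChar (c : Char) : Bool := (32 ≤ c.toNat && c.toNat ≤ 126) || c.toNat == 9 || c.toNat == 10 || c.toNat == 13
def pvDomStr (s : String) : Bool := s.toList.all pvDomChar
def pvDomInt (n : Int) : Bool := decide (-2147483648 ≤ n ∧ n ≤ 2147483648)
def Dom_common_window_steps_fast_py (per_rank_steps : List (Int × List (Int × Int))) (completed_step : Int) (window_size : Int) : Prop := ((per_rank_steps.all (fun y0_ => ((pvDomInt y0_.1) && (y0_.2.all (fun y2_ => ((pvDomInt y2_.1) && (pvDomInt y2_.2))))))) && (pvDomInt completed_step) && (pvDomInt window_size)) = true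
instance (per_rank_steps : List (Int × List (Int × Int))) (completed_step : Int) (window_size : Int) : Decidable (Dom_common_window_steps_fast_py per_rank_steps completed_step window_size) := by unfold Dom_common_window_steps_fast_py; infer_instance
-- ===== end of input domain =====

-- B replaces A's backward integer-by-integer walk from completed_step by intersecting the
-- rank key sets, filtering to [0, completed_step], sorting and taking the last window_size.

-- ===== PORT A =====
-- the while-loop of A: walk s downward while s >= 0 and len(out_rev) < window_size
def pvALoop (ref : List (Int × Int)) (maps1 : List (List (Int × Int))) (window_size : Int) (s : Int) (out_rev : List Int) : List Int :=
  if 0 ≤ s ∧ (out_rev.length : Int) < window_size then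
    let out' :=
      if ref.any (fun p => p.1 == s) then
        -- inner for-loop with break = all remaining maps contain s
        if maps1.all (fun m => m.any (fun p => p.1 == s)) then out_rev ++ [s] else out_rev
      else out_rev
    pvALoop ref maps1 window_size (s - 1) out'
  else out_rev
termination_by (s + 1).toNat
decreasing_by omega

def common_window_steps_fast_py (per_rank_steps : List (Int × List (Int × Int))) (completed_step : Int) (window_size : Int) : List Int :=
  match per_rank_steps with
  | [] => []
  | p0 :: rest =>
      let out_rev := pvALoop p0.2 (rest.map Prod.snd) window_size completed_step []
      if out_rev = [] then [] else out_rev.reverse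

-- ===== PORT B =====
def common_window_steps_fast_py_alt (per_rank_steps : List (Int × List (Int × Int))) (completed_step : Int) (window_size : Int) : List Int :=
  match per_rank_steps with
  | [] => []
  | p0 :: rest =>
      -- common = set(maps[0]); for m in maps[1:]: common = {k for k in common if k in m}
      let common := (rest.map Prod.snd).foldl
        (fun acc m => acc.filter (fun k => m.any (fun p => p.1 == k)))
        (PySem.Set.ofList (p0.2.map Prod.fst))
      -- eligible = sorted(k for k in common if 0 <= k <= completed_step)
      let eligible := PySem.List.sorted (common.filter (fun k => decide (0 ≤ k ∧ k ≤ completed_step))) (fun x => x) false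
      -- eligible[max(len(eligible) - max(window_size, 0), 0):]
      PySem.List.slice eligible (some (max ((eligible.length : Int) - max window_size 0) 0)) none

-- ===== PRECONDITION & SPEC =====
def Spec_common_window_steps_fast_py (per_rank_steps : List (Int × List (Int × Int))) (completed_step : Int) (window_size : Int) (out : List Int) : Prop := out = common_window_steps_fast_py_alt per_rank_steps completed_step window_size
instance (per_rank_steps : List (Int × List (Int × Int))) (completed_step : Int) (window_size : Int) (out : List Int) : Decidable (Spec_common_window_steps_fast_py per_rank_steps completed_step window_size out) := by unfold Spec_common_window_steps_fast_py; infer_instance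

-- ===== CLAIM (what is proved, stated in full; the proofs are below) =====
def Claim_equal_common_window_steps_fast_py : Prop := ∀ (per_rank_steps : List (Int × List (Int × Int))) (completed_step : Int) (window_size : Int), Dom_common_window_steps_fast_py per_rank_steps completed_step window_size → Spec_common_window_steps_fast_py per_rank_steps completed_step window_size (common_window_steps_fast_py per_rank_steps completed_step window_size)

-- ===== LEMMAS AND PROOFS =====

-- [s, s-1, ..., 0] (empty for s < 0): the sequence of values A's loop visits
def pvDesc (s : Int) : List Int :=
  if 0 ≤ s then s :: pvDesc (s - 1) else []
termination_by (s + 1).toNat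
decreasing_by omega

-- "s is a common step": present in the first map and in all the others
def pvCommon (ref : List (Int × Int)) (maps1 : List (List (Int × Int))) (s : Int) : Bool :=
  ref.any (fun p => p.1 == s) && maps1.all (fun m => m.any (fun p => p.1 == s))

lemma pvALoop_eq (ref : List (Int × Int)) (maps1 : List (List (Int × Int))) (ws : Int) :
    ∀ (n : Nat) (s : Int), (s + 1).toNat ≤ n → ∀ (out : List Int),
      pvALoop ref maps1 ws s out =
        out ++ ((pvDesc s).filter (pvCommon ref maps1)).take ((ws - out.length).toNat) := by
  intro n
  induction n with
  | zero =>
      intro s hn out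
      rw [pvALoop, pvDesc]
      have hs : ¬ (0 ≤ s) := by omega
      simp [hs]
  | succ n ih =>
      intro s hn out
      rw [pvALoop, pvDesc]
      by_cases hs : 0 ≤ s
      · by_cases hlen : (out.length : Int) < ws
        · rw [if_pos ⟨hs, hlen⟩, if_pos hs]
          by_cases hr : ref.any (fun p => p.1 == s) = true
          · by_cases ha : maps1.all (fun m => m.any (fun p => p.1 == s)) = true
            · -- s collected
              have hc : pvCommon ref maps1 s = true := by simp [pvCommon, hr, ha]
              have hk : (ws - (out.length : Int)).toNat = (ws - ((out ++ [s]).length : Int)).toNat + 1 := by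
                simp only [List.length_append, List.length_cons, List.length_nil]
                push_cast
                omega
              simp only [hr, ha, if_true]
              rw [ih (s - 1) (by omega) (out ++ [s])]
              simp only [List.filter_cons, hc, hk, List.take_succ_cons,
                List.append_assoc, List.cons_append, List.nil_append, if_true]
            · -- s in ref but not all maps
              have hc : pvCommon ref maps1 s = false := by simp [pvCommon, ha]
              simp only [hr, ha, if_true, Bool.false_eq_true, if_false]
              rw [ih (s - 1) (by omega) out]
              simp only [List.filter_cons, hc, Bool.false_eq_true, if_false]
          · -- s not in ref
            have hc : pvCommon ref maps1 s = false := by simp [pvCommon, hr]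
            simp only [hr, Bool.false_eq_true, if_false]
            rw [ih (s - 1) (by omega) out]
            simp only [List.filter_cons, hc, Bool.false_eq_true, if_false]
        · -- window full
          rw [if_neg (by tauto)]
          have : (ws - (out.length : Int)).toNat = 0 := by omega
          simp [this]
      · rw [if_neg (by tauto), if_neg hs]
        simp

lemma pvDesc_eq : ∀ (n : Nat) (s : Int), (s + 1).toNat ≤ n →
    pvDesc s = ((List.range (s + 1).toNat).map (fun i : Nat => (i : Int))).reverse := by
  intro n
  induction n with
  | zero =>
      intro s hn
      rw [pvDesc]
      have hs : ¬ (0 ≤ s) := by omega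
      have h0 : (s + 1).toNat = 0 := by omega
      simp [hs, h0]
  | succ n ih =>
      intro s hn
      rw [pvDesc]
      by_cases hs : 0 ≤ s
      · rw [if_pos hs, ih (s - 1) (by omega)]
        have h1 : (s - 1 + 1).toNat = s.toNat := by omega
        have h2 : (s + 1).toNat = s.toNat + 1 := by omega
        rw [h1, h2, List.range_succ]
        simp [Int.toNat_of_nonneg hs]
      · rw [if_neg hs]
        have h0 : (s + 1).toNat = 0 := by omega
        simp [h0]

-- membership in the repeated set-comprehension intersection
lemma mem_foldl_filter (g : List (Int × Int) → Int → Bool) :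
    ∀ (l : List (List (Int × Int))) (init : List Int) (x : Int),
      x ∈ l.foldl (fun acc m => acc.filter (g m)) init ↔ x ∈ init ∧ ∀ m ∈ l, g m x = true := by
  intro l
  induction l with
  | nil => intro init x; simp
  | cons m tl ih =>
      intro init x
      simp only [List.foldl_cons, ih, List.mem_filter, List.mem_cons]
      constructor
      · rintro ⟨⟨h1, h2⟩, h3⟩
        refine ⟨h1, ?_⟩
        rintro m' (rfl | hm')
        · exact h2
        · exact h3 m' hm'
      · rintro ⟨h1, h2⟩
        exact ⟨⟨h1, h2 m (Or.inl rfl)⟩, fun m' hm' => h2 m' (Or.inr hm')⟩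

lemma nodup_foldl_filter (g : List (Int × Int) → Int → Bool) :
    ∀ (l : List (List (Int × Int))) (init : List Int), init.Nodup →
      (l.foldl (fun acc m => acc.filter (g m)) init).Nodup := by
  intro l
  induction l with
  | nil => intro init h; simpa
  | cons m tl ih => intro init h; exact ih _ (h.filter _)

-- ===== VERDICT (by name: the statement is the Claim_ definition above) =====
theorem common_window_steps_fast_py_spec : Claim_equal_common_window_steps_fast_py := by
  intro prs cs ws _
  show common_window_steps_fast_py prs cs ws = common_window_steps_fast_py_alt prs cs ws
  match prs with
  | [] => rfl
  | p0 :: rest =>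
    simp only [common_window_steps_fast_py, common_window_steps_fast_py_alt]
    set ref := p0.2 with href
    set maps1 := rest.map Prod.snd with hmaps1
    set asc : List Int := (List.range (cs + 1).toNat).map (fun i : Nat => (i : Int)) with hasc
    set F : List Int := asc.filter (pvCommon ref maps1) with hF
    -- A side: out_rev = F.reverse.take ws.toNat
    have hA : pvALoop ref maps1 ws cs [] = F.reverse.take ws.toNat := by
      rw [pvALoop_eq ref maps1 ws ((cs + 1).toNat) cs le_rfl [],
          pvDesc_eq ((cs + 1).toNat) cs le_rfl]
      simp [hF, hasc, List.filter_reverse]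
    -- asc is strictly increasing, hence so is F
    have hasc_pw : asc.Pairwise (· < ·) := by
      rw [hasc, List.pairwise_map]
      exact List.pairwise_lt_range.imp (by intro a b h; exact_mod_cast h)
    have hF_pw : F.Pairwise (· < ·) := hasc_pw.filter _
    have hF_nd : F.Nodup := hF_pw.imp (fun h => ne_of_lt h)
    -- B side: eligible = F
    set common : List Int := maps1.foldl
        (fun acc m => acc.filter (fun k => m.any (fun p => p.1 == k)))
        (PySem.Set.ofList (ref.map Prod.fst)) with hcommon
    set cf : List Int := common.filter (fun k => decide (0 ≤ k ∧ k ≤ cs)) with hcf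
    have hcf_nd : cf.Nodup := by
      rw [hcf]
      exact (nodup_foldl_filter _ maps1 _ (PySem.Set.nodup_ofList _)).filter _
    have hmem : ∀ x, x ∈ F ↔ x ∈ cf := by
      intro x
      rw [hF, hcf, hcommon, List.mem_filter, List.mem_filter,
          mem_foldl_filter (fun m k => m.any (fun p => p.1 == k)) maps1 _ x]
      have h1 : x ∈ asc ↔ 0 ≤ x ∧ x ≤ cs := by
        rw [hasc, List.mem_map]
        constructor
        · rintro ⟨a, ha, rfl⟩
          have := List.mem_range.mp ha
          omega
        · rintro ⟨h0x, h1x⟩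
          exact ⟨x.toNat, List.mem_range.mpr (by omega), by omega⟩
      have h2 : x ∈ PySem.Set.ofList (ref.map Prod.fst) ↔ ref.any (fun p => p.1 == x) = true := by
        rw [PySem.Set.mem_ofList]
        simp [List.any_eq_true]
      rw [h1, h2]
      simp only [pvCommon, Bool.and_eq_true, List.all_eq_true, decide_eq_true_iff]
      tauto
    have heq : PySem.List.sorted cf (fun x => x) false = F :=
      PySem.List.sorted_eq_of_perm_of_pairwise_lt cf F (fun x => x)
        ((List.perm_ext_iff_of_nodup hF_nd hcf_nd).mpr hmem) hF_pw
    rw [hA, heq]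
    -- both sides are F.drop (F.length - ws.toNat)
    have hstart : (0:Int) ≤ max ((F.length : Int) - max ws 0) 0 := le_max_right _ _
    rw [PySem.List.slice_from _ hstart]
    have hidx : (max ((F.length : Int) - max ws 0) 0).toNat = F.length - ws.toNat := by omega
    rw [hidx]
    -- (F.reverse.take k).reverse = F.drop (F.length - k)
    have hif : F.reverse.take ws.toNat ≠ [] →
        (F.reverse.take ws.toNat).reverse = F.drop (F.length - ws.toNat) := by
      intro _
      rw [List.take_reverse, List.reverse_reverse]
    by_cases hnil : F.reverse.take ws.toNat = []
    · rw [if_pos hnil]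
      have hlen0 : min ws.toNat F.length = 0 := by
        simpa using congrArg List.length hnil
      exact (List.drop_eq_nil_iff.mpr (by omega)).symm
    · rw [if_neg hnil, hif hnil]
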